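-- pv_equiv track=rewrite | github.com/SCJedi/BitNet | tools/bitnet_tools/cli/env.py | format_shell
-- ===== SOURCE A (Python) =====
-- _PLACEHOLDER_HINTS: dict[str, str] = {
--     "PORT": "3000",
--     "HOST": "localhost",
--     "DEBUG": "false",
--     "LOG_LEVEL": "info",
--     "NODE_ENV": "development",
-- }
--
-- def _placeholder(name: str) -> str:
--     """Generate a sensible placeholder value for a variable name."""
--     if name in _PLACEHOLDER_HINTS:
--         return _PLACEHOLDER_HINTS[name]
--     lower = name.lower()
--     if "port" in lower:
--         return "3000"
--     if "host" in lower: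
--         return "localhost"
--     if "url" in lower or "uri" in lower:
--         return "https://example.com"
--     if "secret" in lower or "key" in lower or "token" in lower:
--         return "changeme"
--     if "password" in lower or "passwd" in lower:
--         return "changeme"
--     if "database" in lower or "db_name" in lower:
--         return "mydb"
--     if "user" in lower:
--         return "admin"
--     if "email" in lower:
--         return "admin@example.com"
--     if "debug" in lower:
--         return "false"
--     if "timeout" in lower:
--         return "30"
--     if "redis" in lower and "url" not in lower:
--         return "redis://localhost:6379"
--     return ""
--
-- def format_shell(
--     var_names: list[str],
--     comments: dict[str, str] | None = None,
-- ) -> str: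
--     """Format as shell export statements."""
--     lines: list[str] = []
--     for name in var_names:
--         if comments and name in comments:
--             lines.append(f"# {comments[name]}")
--         val = _placeholder(name)
--         lines.append(f'export {name}="{val}"')
--     return "\n".join(lines)
-- ===== SOURCE B (Python) =====
-- _EXACT = {
--     "PORT": "3000",
--     "HOST": "localhost",
--     "DEBUG": "false",
--     "LOG_LEVEL": "info",
--     "NODE_ENV": "development",
-- }
--
-- # Needle -> priority index; the answer is the needle of minimal priority that
-- # occurs anywhere in the lowered name.  The original chain's "redis and not url"
-- # exclusion is redundant here: "url" itself has a smaller priority (2 < 10),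
-- # so whenever "url" occurs the minimum is already <= 2.
-- _NEEDLE_PRIO = {
--     "port": 0, "host": 1, "url": 2, "uri": 2,
--     "secret": 3, "key": 3, "token": 3,
--     "password": 4, "passwd": 4,
--     "database": 5, "db_name": 5,
--     "user": 6, "email": 7, "debug": 8, "timeout": 9, "redis": 10,
-- }
--
-- _VALUES = ["3000", "localhost", "https://example.com", "changeme", "changeme",
--            "mydb", "admin", "admin@example.com", "false", "30",
--            "redis://localhost:6379"]
--
-- def _placeholder(name):
--     if name in _EXACT:
--         return _EXACT[name]
--     lower = name.lower()
--     # Scan the substrings of the name (needle lengths are 3..8) against a hash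
--     # index of needles, keeping the smallest priority seen.
--     best = 11
--     for i in range(len(lower)):
--         for size in range(3, 9):
--             best = min(best, _NEEDLE_PRIO.get(lower[i:i+size], 11))
--     return _VALUES[best] if best < 11 else ""
--
-- def format_shell(var_names, comments=None):
--     cm = comments or {}
--     blocks = []
--     for name in var_names:
--         entry = f'export {name}="{_placeholder(name)}"'
--         blocks.append(f"# {cm[name]}\n{entry}" if name in cm else entry)
--     return "\n".join(blocks)
-- ===== Notes on version B (the rewrite author's own statement) =====
-- stated objective: alternative
-- what changed: The placeholder if-chain of ordered containment tests is replaced by a different algorithm: enumerate all substrings of the lowered name (needle lengths 3..8), look each up in a needle->priority hash index, and return the value of the minimal priority found (the original 'redis and url not in' exclusion is provably redundant under the minimum); format_shell builds one fused comment+export block per name with map+join.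
import Mathlib
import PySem

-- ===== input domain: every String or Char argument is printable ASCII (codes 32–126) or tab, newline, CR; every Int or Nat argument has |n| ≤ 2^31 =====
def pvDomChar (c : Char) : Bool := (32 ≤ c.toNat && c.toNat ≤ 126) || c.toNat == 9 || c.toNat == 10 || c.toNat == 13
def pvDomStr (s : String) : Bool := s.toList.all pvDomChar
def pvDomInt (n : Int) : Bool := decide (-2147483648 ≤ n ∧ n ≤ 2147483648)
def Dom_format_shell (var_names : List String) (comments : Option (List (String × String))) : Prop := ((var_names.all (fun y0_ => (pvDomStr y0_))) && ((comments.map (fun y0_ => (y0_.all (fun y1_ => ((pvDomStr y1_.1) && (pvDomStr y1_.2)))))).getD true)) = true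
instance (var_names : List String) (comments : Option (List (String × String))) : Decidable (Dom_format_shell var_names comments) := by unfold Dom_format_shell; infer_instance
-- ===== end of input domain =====

-- B replaces the ordered if-chain of containment tests by a different algorithm: it
-- enumerates the substrings of the lowered name (needle lengths 3..8), looks each up in a
-- needle -> priority hash index, and returns the value of the minimal priority found (the
-- original 'redis and url not in' exclusion is provably redundant under the minimum);
-- format_shell builds one block per name with map+join. Objective: alternative.

-- ===== PORT A =====
def pvHintsA : PySem.Dict String String :=
  PySem.Dict.mk [("PORT", "3000"), ("HOST", "localhost"), ("DEBUG", "false"),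
                 ("LOG_LEVEL", "info"), ("NODE_ENV", "development")]

def pvPlaceholderA (name : String) : String :=
  match pvHintsA.get? name with
  | some v => v
  | none =>
    let lower := PySem.Str.lower name
    if PySem.Str.isIn "port" lower then "3000"
    else if PySem.Str.isIn "host" lower then "localhost"
    else if PySem.Str.isIn "url" lower || PySem.Str.isIn "uri" lower then "https://example.com"
    else if PySem.Str.isIn "secret" lower || PySem.Str.isIn "key" lower || PySem.Str.isIn "token" lower then "changeme"
    else if PySem.Str.isIn "password" lower || PySem.Str.isIn "passwd" lower then "changeme"
    else if PySem.Str.isIn "database" lower || PySem.Str.isIn "db_name" lower then "mydb"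
    else if PySem.Str.isIn "user" lower then "admin"
    else if PySem.Str.isIn "email" lower then "admin@example.com"
    else if PySem.Str.isIn "debug" lower then "false"
    else if PySem.Str.isIn "timeout" lower then "30"
    else if PySem.Str.isIn "redis" lower && !(PySem.Str.isIn "url" lower) then "redis://localhost:6379"
    else ""

def format_shell (var_names : List String) (comments : Option (List (String × String))) : String :=
  let lines : List String := var_names.foldl (fun lines name =>
    let lines :=
      match comments with
      | none => lines
      | some cd =>
        if !cd.isEmpty then
          match cd.find? (fun p => p.1 == name) with
          | some p => lines ++ ["# " ++ p.2]
          | none => lines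
        else lines
    lines ++ ["export " ++ name ++ "=\"" ++ pvPlaceholderA name ++ "\""]) []
  PySem.Str.join "\n" lines

-- ===== PORT B =====
def pvExactB : List (String × String) :=
  [("PORT", "3000"), ("HOST", "localhost"), ("DEBUG", "false"),
   ("LOG_LEVEL", "info"), ("NODE_ENV", "development")]

def pvNeedlePrio : PySem.Dict String Int :=
  PySem.Dict.mk [("port", 0), ("host", 1), ("url", 2), ("uri", 2),
                 ("secret", 3), ("key", 3), ("token", 3),
                 ("password", 4), ("passwd", 4),
                 ("database", 5), ("db_name", 5),
                 ("user", 6), ("email", 7), ("debug", 8), ("timeout", 9), ("redis", 10)]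

def pvValuesB : List String :=
  ["3000", "localhost", "https://example.com", "changeme", "changeme",
   "mydb", "admin", "admin@example.com", "false", "30",
   "redis://localhost:6379"]

-- the nested scan of Source B: for i in range(len(lower)): for size in range(3, 9): …
def pvBestB (lower : String) : Int :=
  (PySem.List.pyRange 0 (PySem.Str.len lower) 1).foldl (fun best i =>
    (PySem.List.pyRange 3 9 1).foldl (fun best size =>
      min best (pvNeedlePrio.getD (PySem.Str.slice lower (some i) (some (i + size))) 11)) best) 11

def pvPlaceholderB (name : String) : String :=
  match pvExactB.find? (fun p => p.1 == name) with
  | some p => p.2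
  | none =>
    let lower := PySem.Str.lower name
    let best := pvBestB lower
    -- _VALUES[best]: the index is provably in range (0 ≤ best < 11 under the guard),
    -- so the total form pyGetD is exact here
    if best < 11 then PySem.List.pyGetD pvValuesB best "" else ""

def format_shell_alt (var_names : List String) (comments : Option (List (String × String))) : String :=
  let cm := comments.getD []
  PySem.Str.join "\n" (var_names.map (fun name =>
    let entry := "export " ++ name ++ "=\"" ++ pvPlaceholderB name ++ "\""
    match cm.find? (fun p => p.1 == name) with
    | some p => "# " ++ p.2 ++ "\n" ++ entry
    | none => entry))

-- ===== PRECONDITION & SPEC =====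
def Spec_format_shell (var_names : List String) (comments : Option (List (String × String))) (out : String) : Prop := out = format_shell_alt var_names comments
instance (var_names : List String) (comments : Option (List (String × String))) (out : String) : Decidable (Spec_format_shell var_names comments out) := by unfold Spec_format_shell; infer_instance

-- ===== CLAIM (what is proved, stated in full; the proofs are below) =====
def Claim_equal_format_shell : Prop := ∀ (var_names : List String) (comments : Option (List (String × String))), Dom_format_shell var_names comments → Spec_format_shell var_names comments (format_shell var_names comments)

-- ===== LEMMAS AND PROOFS =====

-- the candidate priorities B's double loop scans (one per (i, size) pair)
def pvCand (l : String) : List Int :=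
  (PySem.List.pyRange 0 (PySem.Str.len l) 1).flatMap (fun i =>
    (PySem.List.pyRange 3 9 1).map (fun size =>
      pvNeedlePrio.getD (PySem.Str.slice l (some i) (some (i + size))) 11))

theorem pvBestB_eq (l : String) : pvBestB l = (pvCand l).foldl min 11 := by
  unfold pvBestB pvCand
  rw [List.foldl_flatMap]
  simp only [List.foldl_map]

theorem pv_foldmin_le_init (L : List Int) (a : Int) : L.foldl min a ≤ a := by
  induction L generalizing a with
  | nil => simp
  | cons x t ih => exact le_trans (ih (min a x)) (min_le_left a x)

theorem pv_foldmin_le_mem (L : List Int) (a x : Int) (hx : x ∈ L) : L.foldl min a ≤ x := by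
  induction L generalizing a with
  | nil => cases hx
  | cons y t ih =>
    rcases List.mem_cons.mp hx with rfl | h
    · exact le_trans (pv_foldmin_le_init t (min a x)) (min_le_right a x)
    · exact ih (min a y) h

theorem pv_foldmin_mem (L : List Int) (a : Int) : L.foldl min a = a ∨ L.foldl min a ∈ L := by
  induction L generalizing a with
  | nil => left; rfl
  | cons y t ih =>
    rcases ih (min a y) with h | h
    · rcases min_choice a y with hm | hm
      · left; rw [List.foldl_cons, h, hm]
      · right; rw [List.foldl_cons, h, hm]; exact List.mem_cons_self
    · right; exact List.mem_cons_of_mem y h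

theorem pv_mem_cand (l : String) {p : Int} (h : p ∈ pvCand l) :
    ∃ s, PySem.Str.isIn s l = true ∧ pvNeedlePrio.getD s 11 = p := by
  unfold pvCand at h
  rcases List.mem_flatMap.mp h with ⟨i, hi, hmem⟩
  rcases List.mem_map.mp hmem with ⟨sz, hsz, rfl⟩
  have hi' := (PySem.List.mem_pyRange_one).mp hi
  have hsz' := (PySem.List.mem_pyRange_one).mp hsz
  refine ⟨_, ?_, rfl⟩
  rw [PySem.Str.isIn_iff_infix, PySem.Str.toList_slice, PySem.Chars.slice_eq_listSlice,
    PySem.List.slice_toNat _ hi'.1 (by omega : (0:Int) ≤ i + sz)]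
  exact List.IsInfix.trans ((List.take_prefix _ _).isInfix) ((List.drop_suffix _ _).isInfix)

theorem pv_mem_cand_of_isIn (l nd : String) {p : Int}
    (h3 : 3 ≤ nd.toList.length) (h8 : nd.toList.length ≤ 8)
    (hget : pvNeedlePrio.getD nd 11 = p)
    (hIn : PySem.Str.isIn nd l = true) : p ∈ pvCand l := by
  have hIn' : PySem.Chars.isIn nd.toList l.toList = true := by
    rw [← PySem.Str.isIn_eq]; exact hIn
  obtain ⟨j, hj⟩ := (PySem.Chars.exists_prefix_drop_iff_isIn nd.toList l.toList).mpr hIn'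
  have hjl : j < l.toList.length := by
    by_contra hge
    have hnil : l.toList.drop j = [] := List.drop_eq_nil_of_le (by omega)
    rw [hnil] at hj
    have hnd : nd.toList = [] := List.prefix_nil.mp hj
    rw [hnd] at h3
    simp at h3
  unfold pvCand
  apply List.mem_flatMap.mpr
  refine ⟨(j : Int), ?_, ?_⟩
  · rw [PySem.List.mem_pyRange_one]
    refine ⟨by positivity, ?_⟩
    rw [PySem.Str.len_eq]; exact_mod_cast hjl
  · apply List.mem_map.mpr
    refine ⟨(nd.toList.length : Int), ?_, ?_⟩
    · rw [PySem.List.mem_pyRange_one]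
      constructor
      · exact_mod_cast h3
      · exact_mod_cast (by omega : nd.toList.length < 9)
    · have hs : PySem.Str.slice l (some (j:Int)) (some ((j:Int) + (nd.toList.length:Int))) = nd := by
        apply String.toList_inj.mp
        rw [PySem.Str.toList_slice, PySem.Chars.slice_eq_listSlice, PySem.List.slice_natCast_add]
        exact (List.prefix_iff_eq_take.mp hj).symm
      rw [hs, hget]

theorem pv_best_le (l nd : String) {p : Int}
    (h3 : 3 ≤ nd.toList.length) (h8 : nd.toList.length ≤ 8)
    (hget : pvNeedlePrio.getD nd 11 = p)
    (hIn : PySem.Str.isIn nd l = true) : pvBestB l ≤ p := by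
  rw [pvBestB_eq]
  exact pv_foldmin_le_mem _ _ _ (pv_mem_cand_of_isIn l nd h3 h8 hget hIn)

theorem pv_best_cases (l : String) :
    pvBestB l = 11 ∨ ∃ s, PySem.Str.isIn s l = true ∧ pvNeedlePrio.getD s 11 = pvBestB l := by
  rw [pvBestB_eq]
  rcases pv_foldmin_mem (pvCand l) 11 with h | h
  · left; exact h
  · right; exact pv_mem_cand l h

theorem pv_best_det (l : String) (p : Int) (hp : p < 11)
    (hub : pvBestB l ≤ p)
    (hlb : ∀ s, PySem.Str.isIn s l = true → ¬ (pvNeedlePrio.getD s 11 < p)) :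
    pvBestB l = p := by
  rcases pv_best_cases l with h | ⟨s, hs, hg⟩
  · omega
  · have := hlb s hs; omega

theorem pv_prio_inv (s : String) :
    pvNeedlePrio.getD s 11 = 11 ∨
    (s = "port" ∧ pvNeedlePrio.getD s 11 = 0) ∨
    (s = "host" ∧ pvNeedlePrio.getD s 11 = 1) ∨
    (s = "url" ∧ pvNeedlePrio.getD s 11 = 2) ∨
    (s = "uri" ∧ pvNeedlePrio.getD s 11 = 2) ∨
    (s = "secret" ∧ pvNeedlePrio.getD s 11 = 3) ∨
    (s = "key" ∧ pvNeedlePrio.getD s 11 = 3) ∨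
    (s = "token" ∧ pvNeedlePrio.getD s 11 = 3) ∨
    (s = "password" ∧ pvNeedlePrio.getD s 11 = 4) ∨
    (s = "passwd" ∧ pvNeedlePrio.getD s 11 = 4) ∨
    (s = "database" ∧ pvNeedlePrio.getD s 11 = 5) ∨
    (s = "db_name" ∧ pvNeedlePrio.getD s 11 = 5) ∨
    (s = "user" ∧ pvNeedlePrio.getD s 11 = 6) ∨
    (s = "email" ∧ pvNeedlePrio.getD s 11 = 7) ∨
    (s = "debug" ∧ pvNeedlePrio.getD s 11 = 8) ∨
    (s = "timeout" ∧ pvNeedlePrio.getD s 11 = 9) ∨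
    (s = "redis" ∧ pvNeedlePrio.getD s 11 = 10) := by
  by_cases h0 : s = "port"
  · subst h0; decide
  by_cases h1 : s = "host"
  · subst h1; decide
  by_cases h2 : s = "url"
  · subst h2; decide
  by_cases h3 : s = "uri"
  · subst h3; decide
  by_cases h4 : s = "secret"
  · subst h4; decide
  by_cases h5 : s = "key"
  · subst h5; decide
  by_cases h6 : s = "token"
  · subst h6; decide
  by_cases h7 : s = "password"
  · subst h7; decide
  by_cases h8 : s = "passwd"
  · subst h8; decide
  by_cases h9 : s = "database"
  · subst h9; decide
  by_cases h10 : s = "db_name"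
  · subst h10; decide
  by_cases h11 : s = "user"
  · subst h11; decide
  by_cases h12 : s = "email"
  · subst h12; decide
  by_cases h13 : s = "debug"
  · subst h13; decide
  by_cases h14 : s = "timeout"
  · subst h14; decide
  by_cases h15 : s = "redis"
  · subst h15; decide
  left
  have e0 : ("port" == s) = false := beq_eq_false_iff_ne.mpr (Ne.symm h0)
  have e1 : ("host" == s) = false := beq_eq_false_iff_ne.mpr (Ne.symm h1)
  have e2 : ("url" == s) = false := beq_eq_false_iff_ne.mpr (Ne.symm h2)
  have e3 : ("uri" == s) = false := beq_eq_false_iff_ne.mpr (Ne.symm h3)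
  have e4 : ("secret" == s) = false := beq_eq_false_iff_ne.mpr (Ne.symm h4)
  have e5 : ("key" == s) = false := beq_eq_false_iff_ne.mpr (Ne.symm h5)
  have e6 : ("token" == s) = false := beq_eq_false_iff_ne.mpr (Ne.symm h6)
  have e7 : ("password" == s) = false := beq_eq_false_iff_ne.mpr (Ne.symm h7)
  have e8 : ("passwd" == s) = false := beq_eq_false_iff_ne.mpr (Ne.symm h8)
  have e9 : ("database" == s) = false := beq_eq_false_iff_ne.mpr (Ne.symm h9)
  have e10 : ("db_name" == s) = false := beq_eq_false_iff_ne.mpr (Ne.symm h10)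
  have e11 : ("user" == s) = false := beq_eq_false_iff_ne.mpr (Ne.symm h11)
  have e12 : ("email" == s) = false := beq_eq_false_iff_ne.mpr (Ne.symm h12)
  have e13 : ("debug" == s) = false := beq_eq_false_iff_ne.mpr (Ne.symm h13)
  have e14 : ("timeout" == s) = false := beq_eq_false_iff_ne.mpr (Ne.symm h14)
  have e15 : ("redis" == s) = false := beq_eq_false_iff_ne.mpr (Ne.symm h15)
  simp [pvNeedlePrio, PySem.Dict.getD, PySem.Dict.get?_mk_cons, PySem.Dict.get?,
    e0, e1, e2, e3, e4, e5, e6, e7, e8, e9, e10, e11, e12, e13, e14, e15]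

theorem placeholder_eq (name : String) : pvPlaceholderB name = pvPlaceholderA name := by
  simp only [pvPlaceholderA, pvPlaceholderB, pvExactB, pvHintsA,
    PySem.Dict.get?_mk_cons, List.find?_cons, List.find?_nil]
  cases _h0 : ("PORT" == name)
  case true => rfl
  cases _h1 : ("HOST" == name)
  case true => rfl
  cases _h2 : ("DEBUG" == name)
  case true => rfl
  cases _h3 : ("LOG_LEVEL" == name)
  case true => rfl
  cases _h4 : ("NODE_ENV" == name)
  case true => rfl
  cases _g0 : (PySem.Str.isIn "port" (PySem.Str.lower name))
  case true =>
    have hB : pvBestB (PySem.Str.lower name) = 0 :=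
      pv_best_det _ 0 (by norm_num)
        (pv_best_le _ "port" (by decide) (by decide) (by decide) _g0)
        (by intro s hs hlt
            rcases pv_prio_inv s with h | ⟨rfl, h⟩ | ⟨rfl, h⟩ | ⟨rfl, h⟩ | ⟨rfl, h⟩ | ⟨rfl, h⟩ | ⟨rfl, h⟩ | ⟨rfl, h⟩ | ⟨rfl, h⟩ | ⟨rfl, h⟩ | ⟨rfl, h⟩ | ⟨rfl, h⟩ | ⟨rfl, h⟩ | ⟨rfl, h⟩ | ⟨rfl, h⟩ | ⟨rfl, h⟩ | ⟨rfl, h⟩ <;>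
              first | omega | simp_all only [Bool.false_eq_true, Bool.true_eq_false])
    rw [hB]; rfl
  cases _g1 : (PySem.Str.isIn "host" (PySem.Str.lower name))
  case true =>
    have hB : pvBestB (PySem.Str.lower name) = 1 :=
      pv_best_det _ 1 (by norm_num)
        (pv_best_le _ "host" (by decide) (by decide) (by decide) _g1)
        (by intro s hs hlt
            rcases pv_prio_inv s with h | ⟨rfl, h⟩ | ⟨rfl, h⟩ | ⟨rfl, h⟩ | ⟨rfl, h⟩ | ⟨rfl, h⟩ | ⟨rfl, h⟩ | ⟨rfl, h⟩ | ⟨rfl, h⟩ | ⟨rfl, h⟩ | ⟨rfl, h⟩ | ⟨rfl, h⟩ | ⟨rfl, h⟩ | ⟨rfl, h⟩ | ⟨rfl, h⟩ | ⟨rfl, h⟩ | ⟨rfl, h⟩ <;>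
              first | omega | simp_all only [Bool.false_eq_true, Bool.true_eq_false])
    rw [hB]; rfl
  cases _g2 : (PySem.Str.isIn "url" (PySem.Str.lower name))
  case true =>
    have hB : pvBestB (PySem.Str.lower name) = 2 :=
      pv_best_det _ 2 (by norm_num)
        (pv_best_le _ "url" (by decide) (by decide) (by decide) _g2)
        (by intro s hs hlt
            rcases pv_prio_inv s with h | ⟨rfl, h⟩ | ⟨rfl, h⟩ | ⟨rfl, h⟩ | ⟨rfl, h⟩ | ⟨rfl, h⟩ | ⟨rfl, h⟩ | ⟨rfl, h⟩ | ⟨rfl, h⟩ | ⟨rfl, h⟩ | ⟨rfl, h⟩ | ⟨rfl, h⟩ | ⟨rfl, h⟩ | ⟨rfl, h⟩ | ⟨rfl, h⟩ | ⟨rfl, h⟩ | ⟨rfl, h⟩ <;>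
              first | omega | simp_all only [Bool.false_eq_true, Bool.true_eq_false])
    rw [hB]; rfl
  cases _g3 : (PySem.Str.isIn "uri" (PySem.Str.lower name))
  case true =>
    have hB : pvBestB (PySem.Str.lower name) = 2 :=
      pv_best_det _ 2 (by norm_num)
        (pv_best_le _ "uri" (by decide) (by decide) (by decide) _g3)
        (by intro s hs hlt
            rcases pv_prio_inv s with h | ⟨rfl, h⟩ | ⟨rfl, h⟩ | ⟨rfl, h⟩ | ⟨rfl, h⟩ | ⟨rfl, h⟩ | ⟨rfl, h⟩ | ⟨rfl, h⟩ | ⟨rfl, h⟩ | ⟨rfl, h⟩ | ⟨rfl, h⟩ | ⟨rfl, h⟩ | ⟨rfl, h⟩ | ⟨rfl, h⟩ | ⟨rfl, h⟩ | ⟨rfl, h⟩ | ⟨rfl, h⟩ <;>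
              first | omega | simp_all only [Bool.false_eq_true, Bool.true_eq_false])
    rw [hB]; rfl
  cases _g4 : (PySem.Str.isIn "secret" (PySem.Str.lower name))
  case true =>
    have hB : pvBestB (PySem.Str.lower name) = 3 :=
      pv_best_det _ 3 (by norm_num)
        (pv_best_le _ "secret" (by decide) (by decide) (by decide) _g4)
        (by intro s hs hlt
            rcases pv_prio_inv s with h | ⟨rfl, h⟩ | ⟨rfl, h⟩ | ⟨rfl, h⟩ | ⟨rfl, h⟩ | ⟨rfl, h⟩ | ⟨rfl, h⟩ | ⟨rfl, h⟩ | ⟨rfl, h⟩ | ⟨rfl, h⟩ | ⟨rfl, h⟩ | ⟨rfl, h⟩ | ⟨rfl, h⟩ | ⟨rfl, h⟩ | ⟨rfl, h⟩ | ⟨rfl, h⟩ | ⟨rfl, h⟩ <;>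
              first | omega | simp_all only [Bool.false_eq_true, Bool.true_eq_false])
    rw [hB]; rfl
  cases _g5 : (PySem.Str.isIn "key" (PySem.Str.lower name))
  case true =>
    have hB : pvBestB (PySem.Str.lower name) = 3 :=
      pv_best_det _ 3 (by norm_num)
        (pv_best_le _ "key" (by decide) (by decide) (by decide) _g5)
        (by intro s hs hlt
            rcases pv_prio_inv s with h | ⟨rfl, h⟩ | ⟨rfl, h⟩ | ⟨rfl, h⟩ | ⟨rfl, h⟩ | ⟨rfl, h⟩ | ⟨rfl, h⟩ | ⟨rfl, h⟩ | ⟨rfl, h⟩ | ⟨rfl, h⟩ | ⟨rfl, h⟩ | ⟨rfl, h⟩ | ⟨rfl, h⟩ | ⟨rfl, h⟩ | ⟨rfl, h⟩ | ⟨rfl, h⟩ | ⟨rfl, h⟩ <;>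
              first | omega | simp_all only [Bool.false_eq_true, Bool.true_eq_false])
    rw [hB]; rfl
  cases _g6 : (PySem.Str.isIn "token" (PySem.Str.lower name))
  case true =>
    have hB : pvBestB (PySem.Str.lower name) = 3 :=
      pv_best_det _ 3 (by norm_num)
        (pv_best_le _ "token" (by decide) (by decide) (by decide) _g6)
        (by intro s hs hlt
            rcases pv_prio_inv s with h | ⟨rfl, h⟩ | ⟨rfl, h⟩ | ⟨rfl, h⟩ | ⟨rfl, h⟩ | ⟨rfl, h⟩ | ⟨rfl, h⟩ | ⟨rfl, h⟩ | ⟨rfl, h⟩ | ⟨rfl, h⟩ | ⟨rfl, h⟩ | ⟨rfl, h⟩ | ⟨rfl, h⟩ | ⟨rfl, h⟩ | ⟨rfl, h⟩ | ⟨rfl, h⟩ | ⟨rfl, h⟩ <;>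
              first | omega | simp_all only [Bool.false_eq_true, Bool.true_eq_false])
    rw [hB]; rfl
  cases _g7 : (PySem.Str.isIn "password" (PySem.Str.lower name))
  case true =>
    have hB : pvBestB (PySem.Str.lower name) = 4 :=
      pv_best_det _ 4 (by norm_num)
        (pv_best_le _ "password" (by decide) (by decide) (by decide) _g7)
        (by intro s hs hlt
            rcases pv_prio_inv s with h | ⟨rfl, h⟩ | ⟨rfl, h⟩ | ⟨rfl, h⟩ | ⟨rfl, h⟩ | ⟨rfl, h⟩ | ⟨rfl, h⟩ | ⟨rfl, h⟩ | ⟨rfl, h⟩ | ⟨rfl, h⟩ | ⟨rfl, h⟩ | ⟨rfl, h⟩ | ⟨rfl, h⟩ | ⟨rfl, h⟩ | ⟨rfl, h⟩ | ⟨rfl, h⟩ | ⟨rfl, h⟩ <;>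
              first | omega | simp_all only [Bool.false_eq_true, Bool.true_eq_false])
    rw [hB]; rfl
  cases _g8 : (PySem.Str.isIn "passwd" (PySem.Str.lower name))
  case true =>
    have hB : pvBestB (PySem.Str.lower name) = 4 :=
      pv_best_det _ 4 (by norm_num)
        (pv_best_le _ "passwd" (by decide) (by decide) (by decide) _g8)
        (by intro s hs hlt
            rcases pv_prio_inv s with h | ⟨rfl, h⟩ | ⟨rfl, h⟩ | ⟨rfl, h⟩ | ⟨rfl, h⟩ | ⟨rfl, h⟩ | ⟨rfl, h⟩ | ⟨rfl, h⟩ | ⟨rfl, h⟩ | ⟨rfl, h⟩ | ⟨rfl, h⟩ | ⟨rfl, h⟩ | ⟨rfl, h⟩ | ⟨rfl, h⟩ | ⟨rfl, h⟩ | ⟨rfl, h⟩ | ⟨rfl, h⟩ <;>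
              first | omega | simp_all only [Bool.false_eq_true, Bool.true_eq_false])
    rw [hB]; rfl
  cases _g9 : (PySem.Str.isIn "database" (PySem.Str.lower name))
  case true =>
    have hB : pvBestB (PySem.Str.lower name) = 5 :=
      pv_best_det _ 5 (by norm_num)
        (pv_best_le _ "database" (by decide) (by decide) (by decide) _g9)
        (by intro s hs hlt
            rcases pv_prio_inv s with h | ⟨rfl, h⟩ | ⟨rfl, h⟩ | ⟨rfl, h⟩ | ⟨rfl, h⟩ | ⟨rfl, h⟩ | ⟨rfl, h⟩ | ⟨rfl, h⟩ | ⟨rfl, h⟩ | ⟨rfl, h⟩ | ⟨rfl, h⟩ | ⟨rfl, h⟩ | ⟨rfl, h⟩ | ⟨rfl, h⟩ | ⟨rfl, h⟩ | ⟨rfl, h⟩ | ⟨rfl, h⟩ <;>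
              first | omega | simp_all only [Bool.false_eq_true, Bool.true_eq_false])
    rw [hB]; rfl
  cases _g10 : (PySem.Str.isIn "db_name" (PySem.Str.lower name))
  case true =>
    have hB : pvBestB (PySem.Str.lower name) = 5 :=
      pv_best_det _ 5 (by norm_num)
        (pv_best_le _ "db_name" (by decide) (by decide) (by decide) _g10)
        (by intro s hs hlt
            rcases pv_prio_inv s with h | ⟨rfl, h⟩ | ⟨rfl, h⟩ | ⟨rfl, h⟩ | ⟨rfl, h⟩ | ⟨rfl, h⟩ | ⟨rfl, h⟩ | ⟨rfl, h⟩ | ⟨rfl, h⟩ | ⟨rfl, h⟩ | ⟨rfl, h⟩ | ⟨rfl, h⟩ | ⟨rfl, h⟩ | ⟨rfl, h⟩ | ⟨rfl, h⟩ | ⟨rfl, h⟩ | ⟨rfl, h⟩ <;>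
              first | omega | simp_all only [Bool.false_eq_true, Bool.true_eq_false])
    rw [hB]; rfl
  cases _g11 : (PySem.Str.isIn "user" (PySem.Str.lower name))
  case true =>
    have hB : pvBestB (PySem.Str.lower name) = 6 :=
      pv_best_det _ 6 (by norm_num)
        (pv_best_le _ "user" (by decide) (by decide) (by decide) _g11)
        (by intro s hs hlt
            rcases pv_prio_inv s with h | ⟨rfl, h⟩ | ⟨rfl, h⟩ | ⟨rfl, h⟩ | ⟨rfl, h⟩ | ⟨rfl, h⟩ | ⟨rfl, h⟩ | ⟨rfl, h⟩ | ⟨rfl, h⟩ | ⟨rfl, h⟩ | ⟨rfl, h⟩ | ⟨rfl, h⟩ | ⟨rfl, h⟩ | ⟨rfl, h⟩ | ⟨rfl, h⟩ | ⟨rfl, h⟩ | ⟨rfl, h⟩ <;>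
              first | omega | simp_all only [Bool.false_eq_true, Bool.true_eq_false])
    rw [hB]; rfl
  cases _g12 : (PySem.Str.isIn "email" (PySem.Str.lower name))
  case true =>
    have hB : pvBestB (PySem.Str.lower name) = 7 :=
      pv_best_det _ 7 (by norm_num)
        (pv_best_le _ "email" (by decide) (by decide) (by decide) _g12)
        (by intro s hs hlt
            rcases pv_prio_inv s with h | ⟨rfl, h⟩ | ⟨rfl, h⟩ | ⟨rfl, h⟩ | ⟨rfl, h⟩ | ⟨rfl, h⟩ | ⟨rfl, h⟩ | ⟨rfl, h⟩ | ⟨rfl, h⟩ | ⟨rfl, h⟩ | ⟨rfl, h⟩ | ⟨rfl, h⟩ | ⟨rfl, h⟩ | ⟨rfl, h⟩ | ⟨rfl, h⟩ | ⟨rfl, h⟩ | ⟨rfl, h⟩ <;>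
              first | omega | simp_all only [Bool.false_eq_true, Bool.true_eq_false])
    rw [hB]; rfl
  cases _g13 : (PySem.Str.isIn "debug" (PySem.Str.lower name))
  case true =>
    have hB : pvBestB (PySem.Str.lower name) = 8 :=
      pv_best_det _ 8 (by norm_num)
        (pv_best_le _ "debug" (by decide) (by decide) (by decide) _g13)
        (by intro s hs hlt
            rcases pv_prio_inv s with h | ⟨rfl, h⟩ | ⟨rfl, h⟩ | ⟨rfl, h⟩ | ⟨rfl, h⟩ | ⟨rfl, h⟩ | ⟨rfl, h⟩ | ⟨rfl, h⟩ | ⟨rfl, h⟩ | ⟨rfl, h⟩ | ⟨rfl, h⟩ | ⟨rfl, h⟩ | ⟨rfl, h⟩ | ⟨rfl, h⟩ | ⟨rfl, h⟩ | ⟨rfl, h⟩ | ⟨rfl, h⟩ <;>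
              first | omega | simp_all only [Bool.false_eq_true, Bool.true_eq_false])
    rw [hB]; rfl
  cases _g14 : (PySem.Str.isIn "timeout" (PySem.Str.lower name))
  case true =>
    have hB : pvBestB (PySem.Str.lower name) = 9 :=
      pv_best_det _ 9 (by norm_num)
        (pv_best_le _ "timeout" (by decide) (by decide) (by decide) _g14)
        (by intro s hs hlt
            rcases pv_prio_inv s with h | ⟨rfl, h⟩ | ⟨rfl, h⟩ | ⟨rfl, h⟩ | ⟨rfl, h⟩ | ⟨rfl, h⟩ | ⟨rfl, h⟩ | ⟨rfl, h⟩ | ⟨rfl, h⟩ | ⟨rfl, h⟩ | ⟨rfl, h⟩ | ⟨rfl, h⟩ | ⟨rfl, h⟩ | ⟨rfl, h⟩ | ⟨rfl, h⟩ | ⟨rfl, h⟩ | ⟨rfl, h⟩ <;>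
              first | omega | simp_all only [Bool.false_eq_true, Bool.true_eq_false])
    rw [hB]; rfl
  cases _g15 : (PySem.Str.isIn "redis" (PySem.Str.lower name))
  case true =>
    have hB : pvBestB (PySem.Str.lower name) = 10 :=
      pv_best_det _ 10 (by norm_num)
        (pv_best_le _ "redis" (by decide) (by decide) (by decide) _g15)
        (by intro s hs hlt
            rcases pv_prio_inv s with h | ⟨rfl, h⟩ | ⟨rfl, h⟩ | ⟨rfl, h⟩ | ⟨rfl, h⟩ | ⟨rfl, h⟩ | ⟨rfl, h⟩ | ⟨rfl, h⟩ | ⟨rfl, h⟩ | ⟨rfl, h⟩ | ⟨rfl, h⟩ | ⟨rfl, h⟩ | ⟨rfl, h⟩ | ⟨rfl, h⟩ | ⟨rfl, h⟩ | ⟨rfl, h⟩ | ⟨rfl, h⟩ <;>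
              first | omega | simp_all only [Bool.false_eq_true, Bool.true_eq_false])
    rw [hB]; rfl
  case false =>
    have hB : pvBestB (PySem.Str.lower name) = 11 := by
      rcases pv_best_cases (PySem.Str.lower name) with h | ⟨s, hs, hg⟩
      · exact h
      · rcases pv_prio_inv s with h | ⟨rfl, h⟩ | ⟨rfl, h⟩ | ⟨rfl, h⟩ | ⟨rfl, h⟩ | ⟨rfl, h⟩ | ⟨rfl, h⟩ | ⟨rfl, h⟩ | ⟨rfl, h⟩ | ⟨rfl, h⟩ | ⟨rfl, h⟩ | ⟨rfl, h⟩ | ⟨rfl, h⟩ | ⟨rfl, h⟩ | ⟨rfl, h⟩ | ⟨rfl, h⟩ | ⟨rfl, h⟩ <;>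
          first | omega | simp_all only [Bool.false_eq_true, Bool.true_eq_false]
    rw [hB]; rfl

-- the effective comment map: None and {} behave alike
def pvCm (comments : Option (List (String × String))) : List (String × String) :=
  match comments with
  | none => []
  | some cd => cd

def pvEntry (n : String) : String := "export " ++ n ++ "=\"" ++ pvPlaceholderA n ++ "\""

def pvLines (cm : List (String × String)) (n : String) : List String :=
  match cm.find? (fun p => p.1 == n) with
  | some p => ["# " ++ p.2, pvEntry n]
  | none => [pvEntry n]

def pvBlock (cm : List (String × String)) (n : String) : String :=
  match cm.find? (fun p => p.1 == n) with
  | some p => "# " ++ p.2 ++ "\n" ++ pvEntry n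
  | none => pvEntry n

theorem pvLines_none {cm : List (String × String)} {n : String}
    (h : cm.find? (fun p => p.1 == n) = none) : pvLines cm n = [pvEntry n] := by
  simp [pvLines, h]

theorem pvLines_some {cm : List (String × String)} {n : String} {p : String × String}
    (h : cm.find? (fun p => p.1 == n) = some p) :
    pvLines cm n = ["# " ++ p.2, pvEntry n] := by
  simp [pvLines, h]

theorem pvBlock_none {cm : List (String × String)} {n : String}
    (h : cm.find? (fun p => p.1 == n) = none) : pvBlock cm n = pvEntry n := by
  simp [pvBlock, h]

theorem pvBlock_some {cm : List (String × String)} {n : String} {p : String × String}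
    (h : cm.find? (fun p => p.1 == n) = some p) :
    pvBlock cm n = "# " ++ p.2 ++ "\n" ++ pvEntry n := by
  simp [pvBlock, h]

theorem pvLines_ne_nil (cm : List (String × String)) (n : String) : pvLines cm n ≠ [] := by
  unfold pvLines; cases cm.find? (fun p => p.1 == n) <;> simp

theorem str_eq_of_toList (s t : String) (h : s.toList = t.toList) : s = t :=
  String.toList_inj.mp h

theorem join_singleton' (sep x : String) : PySem.Str.join sep [x] = x := by
  apply str_eq_of_toList
  simp [PySem.Str.toList_join, PySem.Chars.join_singleton]

theorem join_cons' (sep x : String) (l : List String) (h : l ≠ []) :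
    PySem.Str.join sep (x :: l) = x ++ sep ++ PySem.Str.join sep l := by
  apply str_eq_of_toList
  cases l with
  | nil => exact absurd rfl h
  | cons y r =>
    simp [PySem.Str.toList_join, PySem.Chars.join_cons_cons]

theorem foldA_none (l : List String) (acc : List String) :
    l.foldl (fun lines name =>
      lines ++ ["export " ++ name ++ "=\"" ++ pvPlaceholderA name ++ "\""]) acc
    = acc ++ l.flatMap (pvLines []) := by
  induction l generalizing acc with
  | nil => simp
  | cons n t ih =>
    rw [List.foldl_cons, ih, List.flatMap_cons, ← List.append_assoc]
    congr 1

theorem foldA_some (cd : List (String × String)) (l : List String) (acc : List String) :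
    l.foldl (fun lines name =>
      let lines :=
        if !cd.isEmpty then
          match cd.find? (fun p => p.1 == name) with
          | some p => lines ++ ["# " ++ p.2]
          | none => lines
        else lines
      lines ++ ["export " ++ name ++ "=\"" ++ pvPlaceholderA name ++ "\""]) acc
    = acc ++ l.flatMap (pvLines cd) := by
  induction l generalizing acc with
  | nil => simp
  | cons n t ih =>
    rw [List.foldl_cons, ih, List.flatMap_cons, ← List.append_assoc]
    congr 1
    show (if !cd.isEmpty then
          match cd.find? (fun p => p.1 == n) with
          | some p => acc ++ ["# " ++ p.2]
          | none => acc
        else acc) ++ ["export " ++ n ++ "=\"" ++ pvPlaceholderA n ++ "\""]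
      = acc ++ pvLines cd n
    cases cd with
    | nil => rw [pvLines_none (by simp)]; rfl
    | cons q r =>
      simp only [List.isEmpty_cons, Bool.not_false, if_true]
      cases h : (q :: r).find? (fun p => p.1 == n) with
      | none => rw [pvLines_none h]; simp [pvEntry]
      | some p => rw [pvLines_some h]; simp [pvEntry]

theorem joinLB (cm : List (String × String)) (l : List String) :
    PySem.Str.join "\n" (l.flatMap (pvLines cm)) = PySem.Str.join "\n" (l.map (pvBlock cm)) := by
  induction l with
  | nil => rfl
  | cons n t ih =>
    rw [List.flatMap_cons, List.map_cons]
    cases t with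
    | nil =>
      simp only [List.flatMap_nil, List.map_nil, List.append_nil]
      rw [join_singleton']
      cases h : cm.find? (fun p => p.1 == n) with
      | none => rw [pvLines_none h, pvBlock_none h, join_singleton']
      | some p =>
        rw [pvLines_some h, pvBlock_some h,
          join_cons' _ _ _ (by simp), join_singleton']
    | cons m ms =>
      have hfm : (m :: ms).flatMap (pvLines cm) ≠ [] := by
        simp only [List.flatMap_cons]
        intro h
        exact pvLines_ne_nil cm m (List.append_eq_nil_iff.mp h).1
      have hmap : (m :: ms).map (pvBlock cm) ≠ [] := by simp
      cases h : cm.find? (fun p => p.1 == n) with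
      | none =>
        rw [pvLines_none h, pvBlock_none h, List.singleton_append,
          join_cons' _ _ _ hfm, join_cons' _ _ _ hmap, ih]
      | some p =>
        rw [pvLines_some h, pvBlock_some h,
          show ["# " ++ p.2, pvEntry n] ++ (m :: ms).flatMap (pvLines cm)
              = ("# " ++ p.2) :: pvEntry n :: (m :: ms).flatMap (pvLines cm) from rfl,
          join_cons' _ _ _ (by simp), join_cons' _ _ _ hfm,
          join_cons' _ _ _ hmap, ih]
        apply str_eq_of_toList
        simp

theorem altB (var_names : List String) (comments : Option (List (String × String))) :
    format_shell_alt var_names comments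
      = PySem.Str.join "\n" (var_names.map (pvBlock (pvCm comments))) := by
  unfold format_shell_alt
  cases comments <;>
    · simp only [Option.getD_none, Option.getD_some, placeholder_eq]
      rfl

-- ===== VERDICT (by name: the statement is the Claim_ definition above) =====
theorem format_shell_spec : Claim_equal_format_shell := by
  intro var_names comments _
  unfold Spec_format_shell format_shell
  rw [altB]
  cases comments with
  | none => rw [foldA_none, List.nil_append, joinLB]; rfl
  | some cd => rw [foldA_some, List.nil_append, joinLB]; rfl
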